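-- pv_equiv track=rewrite | github.com/miliar/Code_Jam_Webscraper | solutions_python/Problem_178/3586.py | solve
-- ===== SOURCE A (Python) =====
-- def flip(pancakes, n):
--
-- 	top = pancakes[:n]
--
-- 	output = ""
--
-- 	for pancake in top[::-1]:
-- 		output += reverse(pancake)
--
-- 	output += pancakes[n:]
--
-- 	return output
--
-- def reverse(pancake):
-- 	if pancake == "+":
-- 		return "-"
-- 	return "+"
--
-- def solve(pancakes):
--
-- 	n = len(pancakes)
-- 	outcome = "+" * n
--
-- 	if pancakes == outcome:
-- 		return 0
--
-- 	states = [[] for i in range(n)]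
-- 	states[0] = [pancakes]
--
-- 	pancakeType = list()
--
-- 	for i in range(1, n + 1):
-- 		state = states[i - 1]
--
-- 		for p in state:
--
-- 			for j in range(n):
-- 				j += 1
-- 				flipped = flip(p, j)
--
-- 				if flipped == outcome:
-- 					return i
--
-- 				if flipped not in pancakeType:
-- 					pancakeType.append(flipped)
--
-- 					states[i].append(flipped)
-- ===== SOURCE B (Python) =====
-- def solve(pancakes):
--     # greedy: the minimum number of prefix flip-reverses equals the number of
--     # adjacent changes of the "is this pancake '+'" pattern, with a '+'
--     # sentinel appended (flip() treats every non-'+' character as '-')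
--     t = pancakes + "+"
--     return sum(1 for x, y in zip(t, t[1:]) if (x == "+") != (y == "+"))
-- ===== Notes on version B (the rewrite author's own statement) =====
-- stated objective: faster
-- what changed: Replaces A's breadth-first search over all reachable pancake states (with a linear seen-list) by the greedy closed form: count adjacent changes of the ('+' vs non-'+') pattern with a '+' sentinel appended.
import Mathlib
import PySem

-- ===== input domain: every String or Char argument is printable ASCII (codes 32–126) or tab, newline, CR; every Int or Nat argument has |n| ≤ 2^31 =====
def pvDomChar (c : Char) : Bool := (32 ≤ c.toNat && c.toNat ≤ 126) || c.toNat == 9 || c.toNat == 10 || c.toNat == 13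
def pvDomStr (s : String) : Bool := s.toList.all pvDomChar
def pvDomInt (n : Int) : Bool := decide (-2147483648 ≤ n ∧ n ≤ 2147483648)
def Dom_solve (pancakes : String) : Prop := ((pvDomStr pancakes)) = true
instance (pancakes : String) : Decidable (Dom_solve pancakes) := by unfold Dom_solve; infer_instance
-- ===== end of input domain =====

-- B replaces A's breadth-first search over pancake states by the greedy closed
-- form: count adjacent changes of the ('+' vs non-'+') pattern with a '+'
-- sentinel appended (measured faster in a timing run).

-- ===== PORT A =====
-- Python strings are handled as their character lists (pancakes.toList).

-- reverse(pancake)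
def reverseP (c : Char) : Char := if c = '+' then '-' else '+'

-- flip(pancakes, n) with flip amount j
def flipP (p : List Char) (j : Nat) : List Char :=
  let top := PySem.List.slice p none (some (j : Int))          -- top = pancakes[:j]
  -- for pancake in top[::-1]: output += reverse(pancake)   (top[::-1] = top.reverse)
  let output := top.reverse.foldl (fun out c => out ++ [reverseP c]) []
  output ++ PySem.List.slice p (some (j : Int)) none           -- output += pancakes[j:]

-- inner loop: for j in range(n): j += 1; flipped = flip(p, j); …
-- returns none when `return i` fires, otherwise the updated (pancakeType, states[i])
def jLoopP (outcome p : List Char) (js : List Nat) (pt nl : List (List Char)) :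
    Option (List (List Char) × List (List Char)) :=
  match js with
  | [] => some (pt, nl)
  | j :: rest =>
    let flipped := flipP p (j + 1)
    if flipped = outcome then none
    else if flipped ∈ pt then jLoopP outcome p rest pt nl
    else jLoopP outcome p rest (pt ++ [flipped]) (nl ++ [flipped])

-- middle loop: for p in state: …
def pLoopP (outcome : List Char) (js : List Nat) (ps : List (List Char))
    (pt nl : List (List Char)) : Option (List (List Char) × List (List Char)) :=
  match ps with
  | [] => some (pt, nl)
  | p :: rest =>
    match jLoopP outcome p js pt nl with
    | none => none
    | some (pt', nl') => pLoopP outcome js rest pt' nl'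

-- outer loop: for i in range(1, n + 1): state = states[i-1]; …
-- states[i-1] is only read at step i and states[i] only written at step i, so the
-- port carries them as prev (= states[i-1]) and the freshly built states[i].
-- (At i = n Python's `states[i].append` raises IndexError if it is reached; the
-- port just keeps the list — exactly those inputs are excluded by Pre_solve.)
def iLoopP (outcome : List Char) (js : List Nat) :
    List Nat → List (List Char) → List (List Char) → Int
  | [], _, _ => 0          -- Python falls off the loop returning None; unreachable under Pre_
  | i :: rest, prev, pt =>
    match pLoopP outcome js prev pt [] with
    | none => (i : Int)                      -- return i
    | some (pt', nl) => iLoopP outcome js rest nl pt'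

def solve (pancakes : String) : Int :=
  let p := pancakes.toList
  let n := p.length
  let outcome := List.replicate n '+'        -- "+" * n
  if p = outcome then 0
  else iLoopP outcome (List.range n) (List.range' 1 n) [p] []   -- range(1, n+1) = range' 1 n

-- ===== PORT B =====
def solve_alt (pancakes : String) : Int :=
  let t := pancakes.toList ++ ['+']          -- t = pancakes + "+"
  (t.zip t.tail).foldl
    (fun acc xy => if (xy.1 == '+') != (xy.2 == '+') then acc + 1 else acc) 0

-- ===== PRECONDITION & SPEC =====
-- the '+' / non-'+' pattern of a character (flip() only tests c == '+')
def patC (c : Char) : Char := if c = '+' then '+' else '-'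

-- the alternating pattern ending in '-' of length n, built from the right
def altPat : Nat → List Char
  | 0 => []
  | k + 1 => (if k % 2 = 0 then '-' else '+') :: altPat k

-- Pre_ excludes exactly the inputs on which A raises: A raises IndexError (it
-- writes to the nonexistent states[n]) exactly on strings of length 2 or 3 whose
-- '+'/non-'+' pattern alternates (ending non-'+') and whose last character is
-- neither '+' nor '-' (e.g. "+a"); on every other input A returns normally.
def Pre_solve (pancakes : String) : Prop :=
  ¬ ((pancakes.toList.length = 2 ∨ pancakes.toList.length = 3) ∧
     pancakes.toList.map patC = altPat pancakes.toList.length ∧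
     pancakes.toList.getLastD '+' ≠ '+' ∧ pancakes.toList.getLastD '+' ≠ '-')
instance (pancakes : String) : Decidable (Pre_solve pancakes) := by unfold Pre_solve; infer_instance

def pvWitness_solve : String := "++-"

def Spec_solve (pancakes : String) (out : Int) : Prop := out = solve_alt pancakes
instance (pancakes : String) (out : Int) : Decidable (Spec_solve pancakes out) := by unfold Spec_solve; infer_instance

-- ===== CLAIM (what is proved, stated in full; the proofs are below) =====
def Claim_equal_solve : Prop := ∀ (pancakes : String), Dom_solve pancakes → Pre_solve pancakes → Spec_solve pancakes (solve pancakes)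

-- ===== LEMMAS AND PROOFS =====

-- internal adjacent-inequality count
def bcount : List Char → Nat
  | [] => 0
  | [_] => 0
  | a :: b :: r => (if a = b then 0 else 1) + bcount (b :: r)

-- the potential: boundaries of l with a trailing '+' sentinel
def Fm (l : List Char) : Nat := bcount (l ++ ['+'])

def Sgn (l : List Char) : Prop := ∀ c ∈ l, c = '+' ∨ c = '-'


theorem bcount_cons (a : Char) (l : List Char) :
    bcount (a :: l) = (if a = l.headD a then 0 else 1) + bcount l := by
  cases l <;> simp [bcount]

theorem headD_append_cons (xs : List Char) (a h : Char) (ys : List Char) :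
    (xs ++ h :: ys).headD a = (xs ++ [h]).headD a := by
  cases xs <;> simp

theorem bcount_split (xs : List Char) (h : Char) (ys : List Char) :
    bcount (xs ++ h :: ys) = bcount (xs ++ [h]) + bcount (h :: ys) := by
  induction xs with
  | nil => simp [bcount]
  | cons a xs' ih =>
    rw [List.cons_append, List.cons_append, bcount_cons, bcount_cons, ih,
      headD_append_cons]
    omega

def lastD : List Char → Char → Char
  | [], d => d
  | a :: l, _ => lastD l a

theorem lastD_concat (l : List Char) (a d : Char) : lastD (l ++ [a]) d = a := by
  induction l generalizing d with
  | nil => rfl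
  | cons x l' ih => simpa [lastD] using ih x

theorem lastD_reverse (l : List Char) (d : Char) : lastD l.reverse d = l.headD d := by
  cases l with
  | nil => rfl
  | cons a r => rw [List.reverse_cons, lastD_concat, List.headD_cons]

theorem bcount_concat (xs : List Char) (a : Char) :
    bcount (xs ++ [a]) = bcount xs + (if lastD xs a = a then 0 else 1) := by
  induction xs with
  | nil => simp [bcount, lastD]
  | cons x xs' ih =>
    rw [List.cons_append, bcount_cons, ih, bcount_cons]
    cases xs' with
    | nil => simp [bcount, lastD]
    | cons y r =>
      simp only [lastD, List.cons_append, List.headD_cons]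
      exact (Nat.add_assoc _ _ _).symm

theorem bcount_reverse (l : List Char) : bcount l.reverse = bcount l := by
  induction l with
  | nil => rfl
  | cons a l' ih =>
    rw [List.reverse_cons, bcount_concat, ih, lastD_reverse, bcount_cons,
      if_congr (eq_comm (a := l'.headD a) (b := a)) rfl rfl]
    omega

theorem headD_map (f : Char → Char) (l : List Char) (a : Char) :
    (l.map f).headD (f a) = f (l.headD a) := by
  cases l <;> simp

theorem reverseP_inj (a b : Char) (ha : a = '+' ∨ a = '-') (hb : b = '+' ∨ b = '-') :
    (reverseP a = reverseP b) ↔ a = b := by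
  rcases ha with h | h <;> rcases hb with h' | h' <;> subst h <;> subst h' <;> simp [reverseP]

theorem bcount_map_rev (l : List Char) (hs : Sgn l) :
    bcount (l.map reverseP) = bcount l := by
  induction l with
  | nil => rfl
  | cons a l' ih =>
    have hs' : Sgn l' := fun c hc => hs c (List.mem_cons_of_mem _ hc)
    rw [List.map_cons, bcount_cons, headD_map, ih hs', bcount_cons]
    have ha : a = '+' ∨ a = '-' := hs a List.mem_cons_self
    have hh : l'.headD a = '+' ∨ l'.headD a = '-' := by
      cases l' with
      | nil => simpa using ha
      | cons b r => exact hs b (List.mem_cons_of_mem _ List.mem_cons_self)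
    rw [if_congr (reverseP_inj a (l'.headD a) ha hh) rfl rfl]

theorem Fm_cons (a : Char) (l : List Char) :
    Fm (a :: l) = (if a = l.headD '+' then 0 else 1) + Fm l := by
  show bcount (a :: (l ++ ['+'])) = _
  rw [bcount_cons]
  have : (l ++ ['+']).headD a = l.headD '+' := by cases l <;> simp
  rw [this]
  rfl

theorem Fm_le_length (l : List Char) : Fm l ≤ l.length := by
  induction l with
  | nil => simp [Fm, bcount]
  | cons a l' ih => rw [Fm_cons]; simp only [List.length_cons]; split <;> omega

theorem Fm_replicate (n : Nat) : Fm (List.replicate n '+') = 0 := by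
  induction n with
  | zero => rfl
  | succ k ih =>
    rw [List.replicate_succ, Fm_cons, ih]
    cases k <;> simp [List.replicate_succ]

theorem Fm_eq_zero_iff (l : List Char) :
    Fm l = 0 ↔ l = List.replicate l.length '+' := by
  induction l with
  | nil => simp [Fm, bcount]
  | cons a l' ih =>
    rw [Fm_cons, List.length_cons, List.replicate_succ]
    constructor
    · intro h
      split_ifs at h with hc
      · have h3 := ih.mp (by omega)
        have h4 : l'.headD '+' = '+' := by
          rw [h3]; cases l'.length <;> simp [List.replicate_succ]
        rw [hc, h4, ← h3]
      · omega
    · intro h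
      have h1 : a = '+' := (List.cons_eq_cons.mp h).1
      have h2 : l' = List.replicate l'.length '+' := (List.cons_eq_cons.mp h).2
      have h3 : Fm l' = 0 := ih.mpr h2
      have h4 : l'.headD '+' = '+' := by
        rw [h2]; cases l'.length <;> simp [List.replicate_succ]
      rw [h1, h4, h3]; simp

def runLen : List Char → Nat
  | [] => 0
  | [_] => 1
  | a :: b :: r => if a = b then 1 + runLen (b :: r) else 1

def flipN (p : List Char) (j : Nat) : List Char :=
  ((p.take j).map reverseP).reverse ++ p.drop j

theorem length_flip (s : List Char) (j : Nat) (hj : j ≤ s.length) :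
    (flipN s j).length = s.length := by
  simp [flipN]; omega

theorem exists_head (d : List Char) : ∃ h rest, d ++ ['+'] = h :: rest ∧ (h = '+' ∨ h ∈ d) := by
  cases d with
  | nil => exact ⟨'+', [], rfl, Or.inl rfl⟩
  | cons x d' => exact ⟨x, d' ++ ['+'], rfl, Or.inr List.mem_cons_self⟩

theorem Fm_parts (t d : List Char) (h : Char) (rest : List Char) (hd : d ++ ['+'] = h :: rest) :
    Fm (t ++ d) = bcount (t ++ [h]) + bcount (h :: rest) := by
  unfold Fm
  rw [List.append_assoc, hd, bcount_split]

theorem Fm_flip_lb (s : List Char) (j : Nat) (hs : Sgn s) (_h2 : j ≤ s.length) :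
    Fm s ≤ Fm (flipN s j) + 1 := by
  obtain ⟨h, rest, hdh, _⟩ := exists_head (s.drop j)
  have hst : Sgn (s.take j) := fun c hc => hs c (List.mem_of_mem_take hc)
  have e1 : Fm s = bcount (s.take j ++ [h]) + bcount (h :: rest) := by
    conv_lhs => rw [← List.take_append_drop j s]
    exact Fm_parts _ _ h rest hdh
  have e2 : Fm (flipN s j) =
      bcount (((s.take j).map reverseP).reverse ++ [h]) + bcount (h :: rest) :=
    Fm_parts _ _ h rest hdh
  rw [e1, e2, bcount_concat, bcount_concat, bcount_reverse, bcount_map_rev _ hst]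
  split_ifs <;> omega

theorem runLen_pos (s : List Char) (h : s ≠ []) : 1 ≤ runLen s := by
  cases s with
  | nil => simp at h
  | cons a t =>
    cases t with
    | nil => simp [runLen]
    | cons b r => simp only [runLen]; split <;> omega

theorem runLen_le (s : List Char) : runLen s ≤ s.length := by
  induction s with
  | nil => simp [runLen]
  | cons a t ih =>
    cases t with
    | nil => simp [runLen]
    | cons b r =>
      simp only [runLen, List.length_cons] at *
      split <;> omega

theorem run_uniform (s : List Char) (c : Char) (hc : c ∈ s.take (runLen s)) :
    c = s.headD '+' := by
  induction s generalizing c with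
  | nil => simp at hc
  | cons a t ih =>
    cases t with
    | nil =>
      simp only [runLen, List.take_succ_cons, List.take_zero] at hc
      simp at hc; simp [hc]
    | cons b r =>
      simp only [runLen] at hc
      split at hc
      · rename_i hab
        rw [show 1 + runLen (b :: r) = runLen (b :: r) + 1 from by omega,
          List.take_succ_cons] at hc
        rcases List.mem_cons.mp hc with rfl | hc'
        · simp
        · have h2 := ih c hc'
          simp only [List.headD_cons] at h2 ⊢
          rw [h2, ← hab]
      · simp at hc; simp [hc]

theorem run_drop_head (s : List Char) (x : Char) (d' : List Char)
    (h : s.drop (runLen s) = x :: d') : x ≠ s.headD '+' := by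
  induction s generalizing x d' with
  | nil => simp [runLen] at h
  | cons a t ih =>
    cases t with
    | nil => simp [runLen] at h
    | cons b r =>
      simp only [runLen] at h
      split at h
      · rename_i hab
        rw [show 1 + runLen (b :: r) = runLen (b :: r) + 1 from by omega,
          List.drop_succ_cons] at h
        have h2 := ih x d' h
        simp only [List.headD_cons] at h2 ⊢
        rw [← hab] at h2
        exact h2
      · rename_i hab
        simp only [List.drop_succ_cons, List.drop_zero] at h
        cases h
        simp only [List.headD_cons]
        exact fun hh => hab hh.symm

theorem run_boundary (s : List Char) (_hs : Sgn s) (h1 : 1 ≤ Fm s) :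
    (s.drop (runLen s) ++ ['+']).headD '+' ≠ s.headD '+' := by
  cases hd : s.drop (runLen s) with
  | nil =>
    simp only [List.nil_append, List.headD_cons]
    intro hplus
    have hlen : s.length ≤ runLen s := List.drop_eq_nil_iff.mp hd
    have htake : s.take (runLen s) = s := List.take_of_length_le hlen
    have huni : ∀ c ∈ s, c = '+' := by
      intro c hc
      have := run_uniform s c (by rw [htake]; exact hc)
      rw [this, ← hplus]
    have : s = List.replicate s.length '+' := List.eq_replicate_of_mem huni
    have h0 : Fm s = 0 := by rw [this, Fm_replicate]
    omega
  | cons x d' =>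
    simp only [List.cons_append, List.headD_cons]
    exact run_drop_head s x d' hd

theorem lastD_uniform (t : List Char) (a d : Char) (huni : ∀ c ∈ t, c = a)
    (hne : t ≠ []) : lastD t d = a := by
  induction t generalizing d with
  | nil => simp at hne
  | cons x t' ih =>
    cases t' with
    | nil => exact huni x List.mem_cons_self
    | cons y r =>
      show lastD (y :: r) x = a
      exact ih x (fun c hc => huni c (List.mem_cons_of_mem _ hc)) (by simp)

theorem Fm_flip_run (s : List Char) (hs : Sgn s) (h1 : 1 ≤ Fm s) :
    Fm (flipN s (runLen s)) + 1 = Fm s := by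
  have hsnil : s ≠ [] := by rintro rfl; simp [Fm, bcount] at h1
  have hk1 : 1 ≤ runLen s := runLen_pos s hsnil
  have hkle : runLen s ≤ s.length := runLen_le s
  obtain ⟨h, rest, hdh, hsign⟩ := exists_head (s.drop (runLen s))
  have hst : Sgn (s.take (runLen s)) := fun c hc => hs c (List.mem_of_mem_take hc)
  have e1 : Fm s = bcount (s.take (runLen s) ++ [h]) + bcount (h :: rest) := by
    conv_lhs => rw [← List.take_append_drop (runLen s) s]
    exact Fm_parts _ _ h rest hdh
  have e2 : Fm (flipN s (runLen s)) =
      bcount (((s.take (runLen s)).map reverseP).reverse ++ [h]) + bcount (h :: rest) :=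
    Fm_parts _ _ h rest hdh
  -- h is the character after the first run (or the sentinel) and differs from the head a
  have hh_eq : (s.drop (runLen s) ++ ['+']).headD '+' = h := by rw [hdh]; rfl
  have hha : h ≠ s.headD '+' := hh_eq ▸ run_boundary s hs h1
  -- the first run is uniform and nonempty
  obtain ⟨a0, t', htstruct⟩ : ∃ a0 t', s.take (runLen s) = a0 :: t' := by
    cases htk : s.take (runLen s) with
    | nil =>
      exfalso
      have hlen := congrArg List.length htk
      rw [List.length_take] at hlen
      simp only [List.length_nil] at hlen
      omega
    | cons a0 t' => exact ⟨a0, t', rfl⟩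
  have huni : ∀ c ∈ s.take (runLen s), c = s.headD '+' := fun c hc => run_uniform s c hc
  have ha0 : a0 = s.headD '+' := huni a0 (htstruct ▸ List.mem_cons_self)
  -- first indicator: lastD (take) h = head a ≠ h
  have hlast : lastD (s.take (runLen s)) h = s.headD '+' :=
    lastD_uniform _ _ _ huni (by rw [htstruct]; simp)
  -- second indicator: lastD of the flipped prefix is reverseP a = h
  have hlast2 : lastD (((s.take (runLen s)).map reverseP).reverse) h = reverseP (s.headD '+') := by
    rw [lastD_reverse, htstruct, List.map_cons, List.headD_cons, ha0]
  have hrev : reverseP (s.headD '+') = h := by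
    have hasgn : s.headD '+' = '+' ∨ s.headD '+' = '-' := by
      cases s with
      | nil => simp at hsnil
      | cons c r => exact hs c List.mem_cons_self
    have hhsgn : h = '+' ∨ h = '-' := by
      rcases hsign with h' | h'
      · exact Or.inl h'
      · exact hs h (List.mem_of_mem_drop h')
    rcases hasgn with ha | ha <;> rcases hhsgn with hb | hb <;>
      rw [ha, hb] <;> first
      | rfl
      | (exfalso; apply hha; rw [ha, hb])
  rw [e1, e2, bcount_concat, bcount_concat, bcount_reverse, bcount_map_rev _ hst,
    hlast, hlast2, hrev, if_pos rfl, if_neg (fun hh => hha hh.symm)]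
  omega


theorem foldl_snoc_map (l : List Char) (acc : List Char) :
    l.foldl (fun out c => out ++ [reverseP c]) acc = acc ++ l.map reverseP := by
  induction l generalizing acc with
  | nil => simp
  | cons a l' ih => simp [ih]

theorem flipP_eq (p : List Char) (j : Nat) : flipP p j = flipN p j := by
  simp only [flipP, flipN]
  rw [PySem.List.slice_to_natCast, PySem.List.slice_from_natCast, foldl_snoc_map,
    List.nil_append]
  simp only [List.map_reverse]

theorem patC_sign (c : Char) : patC c = '+' ∨ patC c = '-' := by
  unfold patC; split
  · exact Or.inl rfl
  · exact Or.inr rfl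

theorem Sgn_pat (l : List Char) : Sgn (l.map patC) := by
  intro c hc
  obtain ⟨x, _, rfl⟩ := List.mem_map.mp hc
  exact patC_sign x

theorem patC_eq_plus (c : Char) : patC c = '+' ↔ c = '+' := by
  unfold patC; split
  · rename_i h; exact ⟨fun _ => h, fun _ => rfl⟩
  · rename_i h; exact ⟨fun hh => absurd hh (by decide), fun hh => absurd hh h⟩

theorem patC_reverseP (c : Char) : patC (reverseP c) = reverseP (patC c) := by
  unfold patC reverseP
  by_cases h : c = '+' <;> simp [h]

theorem pat_flip (s : List Char) (j : Nat) :
    (flipN s j).map patC = flipN (s.map patC) j := by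
  unfold flipN
  rw [← List.map_take, ← List.map_drop, List.map_map, List.map_append, List.map_reverse,
    List.map_map]
  congr 2
  exact List.map_congr_left (fun c _ => patC_reverseP c)

theorem map_pat_eq_replicate (l : List Char) (n : Nat)
    (h : l.map patC = List.replicate n '+') : l = List.replicate n '+' := by
  induction l generalizing n with
  | nil => cases n <;> simp_all [List.replicate_succ]
  | cons a t ih =>
    cases n with
    | zero => simp at h
    | succ k =>
      rw [List.replicate_succ] at h ⊢
      rw [List.map_cons] at h
      obtain ⟨h1, h2⟩ := List.cons_eq_cons.mp h
      rw [(patC_eq_plus a).mp h1, ih k h2]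

theorem Pf_lb (q : List Char) (j : Nat) (hj : j ≤ q.length) :
    Fm (q.map patC) ≤ Fm ((flipN q j).map patC) + 1 := by
  rw [pat_flip]
  exact Fm_flip_lb (q.map patC) j (Sgn_pat q) (by simpa using hj)

theorem Pf_run (q : List Char) (h1 : 1 ≤ Fm (q.map patC)) :
    Fm ((flipN q (runLen (q.map patC))).map patC) + 1 = Fm (q.map patC) := by
  rw [pat_flip]
  exact Fm_flip_run (q.map patC) (Sgn_pat q) h1

theorem map_pat_replicate (n : Nat) :
    (List.replicate n '+').map patC = List.replicate n '+' := by
  simp [List.map_replicate, patC]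

theorem altFold (l : List Char) (acc : Int) :
    ((l ++ ['+']).zip (l ++ ['+']).tail).foldl
        (fun acc xy => if (xy.1 == '+') != (xy.2 == '+') then acc + 1 else acc) acc
      = acc + (Fm (l.map patC) : Int) := by
  induction l generalizing acc with
  | nil => simp [Fm, bcount]
  | cons a l' ih =>
    obtain ⟨h, rest, hdh, -⟩ := exists_head l'
    have hh : (l'.map patC).headD '+' = patC h := by
      cases l' with
      | nil => injection hdh with h1 _; rw [← h1]; rfl
      | cons x t => injection hdh with h1 _; rw [h1]; rfl
    rw [show ((a :: l') ++ ['+']) = a :: (l' ++ ['+']) from rfl, hdh]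
    rw [List.tail_cons, List.zip_cons_cons, List.foldl_cons]
    have hzip : (h :: rest).zip ((h :: rest).tail) = (l' ++ ['+']).zip (l' ++ ['+']).tail := by
      rw [hdh]
    rw [show ((h :: rest).zip rest) = ((h :: rest).zip ((h :: rest).tail)) from rfl, hzip, ih]
    rw [List.map_cons, Fm_cons, hh]
    have hcond : (((a == '+') != (h == '+')) = true) ↔ ¬ (patC a = patC h) := by
      unfold patC
      by_cases ha : a = '+' <;> by_cases hb : h = '+' <;> simp [ha, hb]
    by_cases hph : patC a = patC h
    · rw [if_neg (by rw [hcond]; exact fun hc => hc hph), if_pos hph]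
      push_cast
      omega
    · rw [if_pos (hcond.mpr hph), if_neg hph]
      push_cast
      omega

theorem solve_alt_eq (s : String) : solve_alt s = (Fm (s.toList.map patC) : Int) := by
  show ((s.toList ++ ['+']).zip (s.toList ++ ['+']).tail).foldl
        (fun acc xy => if (xy.1 == '+') != (xy.2 == '+') then acc + 1 else acc) 0
      = (Fm (s.toList.map patC) : Int)
  rw [altFold]
  omega

-- ---- BFS loop lemmas ----

theorem jLoop_none_iff (o p : List Char) (js : List Nat) (pt nl : List (List Char)) :
    jLoopP o p js pt nl = none ↔ ∃ j ∈ js, flipP p (j + 1) = o := by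
  induction js generalizing pt nl with
  | nil => simp [jLoopP]
  | cons j rest ih =>
    simp only [jLoopP]
    split_ifs with h1 h2
    · exact iff_of_true rfl ⟨j, List.mem_cons_self, h1⟩
    · rw [ih]
      constructor
      · rintro ⟨j', hj', hf⟩; exact ⟨j', List.mem_cons_of_mem _ hj', hf⟩
      · rintro ⟨j', hj', hf⟩
        rcases List.mem_cons.mp hj' with rfl | hj''
        · exact absurd hf h1
        · exact ⟨j', hj'', hf⟩
    · rw [ih]
      constructor
      · rintro ⟨j', hj', hf⟩; exact ⟨j', List.mem_cons_of_mem _ hj', hf⟩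
      · rintro ⟨j', hj', hf⟩
        rcases List.mem_cons.mp hj' with rfl | hj''
        · exact absurd hf h1
        · exact ⟨j', hj'', hf⟩

theorem jLoop_some (o p : List Char) (js : List Nat) (pt nl pt' nl' : List (List Char))
    (h : jLoopP o p js pt nl = some (pt', nl')) :
    (∀ q ∈ pt, q ∈ pt') ∧ (∀ q ∈ nl, q ∈ nl') ∧
    (∀ q ∈ pt', q ∈ pt ∨ ∃ j ∈ js, q = flipP p (j + 1)) ∧
    (∀ q ∈ nl', q ∈ nl ∨ ∃ j ∈ js, q = flipP p (j + 1)) ∧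
    (∀ q ∈ pt', q ∈ pt ∨ q ∈ nl') ∧
    (∀ j ∈ js, flipP p (j + 1) ∈ pt') := by
  induction js generalizing pt nl with
  | nil =>
    simp only [jLoopP, Option.some_inj, Prod.mk.injEq] at h
    obtain ⟨rfl, rfl⟩ := h
    exact ⟨fun q hq => hq, fun q hq => hq,
      fun q hq => Or.inl hq, fun q hq => Or.inl hq, fun q hq => Or.inl hq,
      by simp⟩
  | cons j rest ih =>
    simp only [jLoopP] at h
    split_ifs at h with h1 h2
    · obtain ⟨m1, m2, s1, s2, pn, hit⟩ := ih _ _ h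
      refine ⟨m1, m2, ?_, ?_, pn, ?_⟩
      · intro q hq
        rcases s1 q hq with hq0 | ⟨j', hj', hf⟩
        · exact Or.inl hq0
        · exact Or.inr ⟨j', List.mem_cons_of_mem _ hj', hf⟩
      · intro q hq
        rcases s2 q hq with hq0 | ⟨j', hj', hf⟩
        · exact Or.inl hq0
        · exact Or.inr ⟨j', List.mem_cons_of_mem _ hj', hf⟩
      · intro j' hj'
        rcases List.mem_cons.mp hj' with rfl | hj''
        · exact m1 _ h2
        · exact hit j' hj''
    · obtain ⟨m1, m2, s1, s2, pn, hit⟩ := ih _ _ h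
      have hm1 : ∀ q ∈ pt, q ∈ pt' := fun q hq =>
        m1 q (List.mem_append_left _ hq)
      have hm2 : ∀ q ∈ nl, q ∈ nl' := fun q hq =>
        m2 q (List.mem_append_left _ hq)
      have hfl_pt : flipP p (j + 1) ∈ pt' :=
        m1 _ (List.mem_append_right _ List.mem_cons_self)
      have hfl_nl : flipP p (j + 1) ∈ nl' :=
        m2 _ (List.mem_append_right _ List.mem_cons_self)
      refine ⟨hm1, hm2, ?_, ?_, ?_, ?_⟩
      · intro q hq
        rcases s1 q hq with hq0 | ⟨j', hj', hf⟩
        · rcases List.mem_append.mp hq0 with hq1 | hq1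
          · exact Or.inl hq1
          · exact Or.inr ⟨j, List.mem_cons_self, List.mem_singleton.mp hq1⟩
        · exact Or.inr ⟨j', List.mem_cons_of_mem _ hj', hf⟩
      · intro q hq
        rcases s2 q hq with hq0 | ⟨j', hj', hf⟩
        · rcases List.mem_append.mp hq0 with hq1 | hq1
          · exact Or.inl hq1
          · exact Or.inr ⟨j, List.mem_cons_self, List.mem_singleton.mp hq1⟩
        · exact Or.inr ⟨j', List.mem_cons_of_mem _ hj', hf⟩
      · intro q hq
        rcases pn q hq with hq0 | hq1
        · rcases List.mem_append.mp hq0 with hq1 | hq1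
          · exact Or.inl hq1
          · exact Or.inr (List.mem_singleton.mp hq1 ▸ hfl_nl)
        · exact Or.inr hq1
      · intro j' hj'
        rcases List.mem_cons.mp hj' with rfl | hj''
        · exact hfl_pt
        · exact hit j' hj''

theorem pLoop_none_iff (o : List Char) (js : List Nat) (ps pt nl : List (List Char)) :
    pLoopP o js ps pt nl = none ↔ ∃ p ∈ ps, ∃ j ∈ js, flipP p (j + 1) = o := by
  induction ps generalizing pt nl with
  | nil => simp [pLoopP]
  | cons p rest ih =>
    simp only [pLoopP]
    cases hj : jLoopP o p js pt nl with
    | none =>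
      obtain ⟨j, hjm, hf⟩ := (jLoop_none_iff o p js pt nl).mp hj
      exact iff_of_true rfl ⟨p, List.mem_cons_self, j, hjm, hf⟩
    | some res =>
      obtain ⟨pt1, nl1⟩ := res
      rw [ih]
      constructor
      · rintro ⟨p', hp', hf⟩; exact ⟨p', List.mem_cons_of_mem _ hp', hf⟩
      · rintro ⟨p', hp', j, hjm, hf⟩
        rcases List.mem_cons.mp hp' with rfl | hp''
        · exact absurd ((jLoop_none_iff o p' js pt nl).mpr ⟨j, hjm, hf⟩) (by simp [hj])
        · exact ⟨p', hp'', j, hjm, hf⟩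

theorem pLoop_some (o : List Char) (js : List Nat) (ps pt nl pt' nl' : List (List Char))
    (h : pLoopP o js ps pt nl = some (pt', nl')) :
    (∀ q ∈ pt, q ∈ pt') ∧ (∀ q ∈ nl, q ∈ nl') ∧
    (∀ q ∈ pt', q ∈ pt ∨ ∃ p ∈ ps, ∃ j ∈ js, q = flipP p (j + 1)) ∧
    (∀ q ∈ nl', q ∈ nl ∨ ∃ p ∈ ps, ∃ j ∈ js, q = flipP p (j + 1)) ∧
    (∀ q ∈ pt', q ∈ pt ∨ q ∈ nl') ∧
    (∀ p ∈ ps, ∀ j ∈ js, flipP p (j + 1) ∈ pt') := by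
  induction ps generalizing pt nl with
  | nil =>
    simp only [pLoopP, Option.some_inj, Prod.mk.injEq] at h
    obtain ⟨rfl, rfl⟩ := h
    exact ⟨fun q hq => hq, fun q hq => hq,
      fun q hq => Or.inl hq, fun q hq => Or.inl hq, fun q hq => Or.inl hq,
      by simp⟩
  | cons p rest ih =>
    simp only [pLoopP] at h
    cases hj : jLoopP o p js pt nl with
    | none => rw [hj] at h; simp at h
    | some res =>
      obtain ⟨pt1, nl1⟩ := res
      rw [hj] at h
      obtain ⟨jm1, jm2, js1, js2, jpn, jhit⟩ := jLoop_some o p js pt nl pt1 nl1 hj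
      obtain ⟨m1, m2, s1, s2, pn, hit⟩ := ih _ _ h
      refine ⟨fun q hq => m1 q (jm1 q hq), fun q hq => m2 q (jm2 q hq), ?_, ?_, ?_, ?_⟩
      · intro q hq
        rcases s1 q hq with hq0 | ⟨p', hp', hf⟩
        · rcases js1 q hq0 with hq1 | ⟨j', hj', hf⟩
          · exact Or.inl hq1
          · exact Or.inr ⟨p, List.mem_cons_self, j', hj', hf⟩
        · exact Or.inr ⟨p', List.mem_cons_of_mem _ hp', hf⟩
      · intro q hq
        rcases s2 q hq with hq0 | ⟨p', hp', hf⟩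
        · rcases js2 q hq0 with hq1 | ⟨j', hj', hf⟩
          · exact Or.inl hq1
          · exact Or.inr ⟨p, List.mem_cons_self, j', hj', hf⟩
        · exact Or.inr ⟨p', List.mem_cons_of_mem _ hp', hf⟩
      · intro q hq
        rcases pn q hq with hq0 | hq1
        · rcases jpn q hq0 with hq1 | hq1
          · exact Or.inl hq1
          · exact Or.inr (m2 q hq1)
        · exact Or.inr hq1
      · intro p' hp' j' hj'
        rcases List.mem_cons.mp hp' with rfl | hp''
        · exact m1 _ (jhit j' hj')
        · exact hit p' hp'' j' hj'

theorem iLoop_main (n : Nat) : ∀ (fuel i m : Nat) (prev pt : List (List Char)),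
    fuel = n + 1 - i → 1 ≤ i → i ≤ m → m ≤ n →
    (∀ q ∈ prev, q.length = n ∧ m + 1 ≤ Fm (q.map patC) + i) →
    (∃ q ∈ prev, Fm (q.map patC) + i = m + 1) →
    (∀ q ∈ pt, m + 1 ≤ Fm (q.map patC) + i) →
    iLoopP (List.replicate n '+') (List.range n) (List.range' i (n + 1 - i)) prev pt
      = (m : Int) := by
  intro fuel
  induction fuel with
  | zero => intro i m prev pt hfuel h1i him hmn _ _ _; omega
  | succ f ihf =>
    intro i m prev pt hfuel h1i him hmn hprev hex hpt
    have hrange : n + 1 - i = (n - i) + 1 := by omega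
    rw [hrange, List.range'_succ]
    have flip_out : ∀ q : List Char, q.length = n → ∀ j : Nat, j + 1 ≤ n →
        flipP q (j + 1) = List.replicate n '+' → Fm (q.map patC) ≤ 1 := by
      intro q hlen j hj hflip
      have hlb := Pf_lb q (j + 1) (by omega)
      rw [flipP_eq] at hflip
      rw [hflip, map_pat_replicate, Fm_replicate] at hlb
      omega
    by_cases hlast : i = m
    · subst hlast
      obtain ⟨q, hq_mem, hq⟩ := hex
      obtain ⟨hqlen, -⟩ := hprev q hq_mem
      have hFq : Fm (q.map patC) = 1 := by omega
      have hqne : q ≠ [] := by rintro rfl; simp [Fm, bcount] at hFq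
      have hrl1 : 1 ≤ runLen (q.map patC) := runLen_pos _ (by simpa using hqne)
      have hrln : runLen (q.map patC) ≤ n := by
        have := runLen_le (q.map patC)
        rw [List.length_map, hqlen] at this
        exact this
      have hflip : flipN q (runLen (q.map patC)) = List.replicate n '+' := by
        have h0 : Fm ((flipN q (runLen (q.map patC))).map patC) = 0 := by
          have := Pf_run q (by omega)
          omega
        have hrepl := (Fm_eq_zero_iff _).mp h0
        have hlenf : (flipN q (runLen (q.map patC))).length = n := by
          rw [length_flip q _ (by rw [hqlen]; exact hrln)]
          exact hqlen
        rw [List.length_map, hlenf] at hrepl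
        exact map_pat_eq_replicate _ _ hrepl
      have hnone : pLoopP (List.replicate n '+') (List.range n) prev pt [] = none := by
        rw [pLoop_none_iff]
        refine ⟨q, hq_mem, runLen (q.map patC) - 1, List.mem_range.mpr (by omega), ?_⟩
        rw [flipP_eq, show runLen (q.map patC) - 1 + 1 = runLen (q.map patC) from by omega]
        exact hflip
      simp only [iLoopP, hnone]
    · have him' : i < m := by omega
      cases hp : pLoopP (List.replicate n '+') (List.range n) prev pt [] with
      | none =>
        exfalso
        obtain ⟨p, hp_mem, j, hj_mem, hflip⟩ := (pLoop_none_iff _ _ _ _ _).mp hp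
        obtain ⟨hplen, hplb⟩ := hprev p hp_mem
        have := flip_out p hplen j (by have := List.mem_range.mp hj_mem; omega) hflip
        omega
      | some res =>
        obtain ⟨pt', nl'⟩ := res
        simp only [iLoopP, hp]
        obtain ⟨hmono_pt, hmono_nl, hsub_pt, hsub_nl, hptnl, hhit⟩ :=
          pLoop_some _ _ _ _ _ _ _ hp
        have hnew : ∀ q ∈ nl', q.length = n ∧ m + 1 ≤ Fm (q.map patC) + (i + 1) := by
          intro q hq
          rcases hsub_nl q hq with hq0 | ⟨p, hpmem, j, hjmem, rfl⟩
          · simp at hq0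
          · obtain ⟨hplen, hplb⟩ := hprev p hpmem
            have hjn : j + 1 ≤ n := by have := List.mem_range.mp hjmem; omega
            rw [flipP_eq]
            refine ⟨?_, ?_⟩
            · rw [length_flip _ _ (by rw [hplen]; omega)]; exact hplen
            · have := Pf_lb p (j + 1) (by rw [hplen]; omega)
              omega
        have hex' : ∃ q ∈ nl', Fm (q.map patC) + (i + 1) = m + 1 := by
          obtain ⟨p, hpmem, hpeq⟩ := hex
          obtain ⟨hplen, -⟩ := hprev p hpmem
          have hpne : p ≠ [] := by
            rintro rfl
            simp [Fm, bcount] at hpeq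
            omega
          have hrun := Pf_run p (by omega)
          have hrl1 : 1 ≤ runLen (p.map patC) := runLen_pos _ (by simpa using hpne)
          have hrln : runLen (p.map patC) ≤ n := by
            have := runLen_le (p.map patC)
            rw [List.length_map, hplen] at this
            exact this
          have hmem_pt' : flipP p ((runLen (p.map patC) - 1) + 1) ∈ pt' :=
            hhit p hpmem (runLen (p.map patC) - 1) (List.mem_range.mpr (by omega))
          rw [show runLen (p.map patC) - 1 + 1 = runLen (p.map patC) from by omega,
            flipP_eq] at hmem_pt'
          rcases hptnl _ hmem_pt' with hin_pt | hin_nl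
          · exfalso
            have := hpt _ hin_pt
            omega
          · exact ⟨_, hin_nl, by omega⟩
        have hpt' : ∀ q ∈ pt', m + 1 ≤ Fm (q.map patC) + (i + 1) := by
          intro q hq
          rcases hsub_pt q hq with hq0 | ⟨p, hpmem, j, hjmem, rfl⟩
          · have := hpt q hq0; omega
          · obtain ⟨hplen, hplb⟩ := hprev p hpmem
            have hjn : j + 1 ≤ n := by have := List.mem_range.mp hjmem; omega
            rw [flipP_eq]
            have := Pf_lb p (j + 1) (by rw [hplen]; omega)
            omega
        have hrec := ihf (i + 1) m nl' pt' (by omega) (by omega) (by omega) hmn hnew hex' hpt'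
        rw [show n + 1 - (i + 1) = n - i from by omega] at hrec
        exact hrec

-- ===== VERDICT (by name: the statements are the Claim_ definitions above) =====
theorem solve_spec : Claim_equal_solve := by
  intro s _ _hpre
  unfold Spec_solve
  rw [solve_alt_eq]
  show (if s.toList = List.replicate s.toList.length '+' then (0 : Int)
    else iLoopP (List.replicate s.toList.length '+') (List.range s.toList.length)
      (List.range' 1 s.toList.length) [s.toList] []) = (Fm (s.toList.map patC) : Int)
  by_cases hout : s.toList = List.replicate s.toList.length '+'
  · rw [if_pos hout]
    conv_rhs => rw [hout]
    rw [map_pat_replicate, Fm_replicate]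
    rfl
  · rw [if_neg hout]
    have hm1 : 1 ≤ Fm (s.toList.map patC) := by
      rcases Nat.eq_zero_or_pos (Fm (s.toList.map patC)) with h0 | h1
      · exfalso
        have hrepl := (Fm_eq_zero_iff _).mp h0
        rw [List.length_map] at hrepl
        exact hout (map_pat_eq_replicate _ _ hrepl)
      · exact h1
    have hmn : Fm (s.toList.map patC) ≤ s.toList.length := by
      have := Fm_le_length (s.toList.map patC)
      rw [List.length_map] at this
      exact this
    have hmain := iLoop_main s.toList.length s.toList.length 1 (Fm (s.toList.map patC))
      [s.toList] []
      (by omega) le_rfl hm1 hmn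
      (by
        intro q hq
        rw [List.mem_singleton] at hq
        subst hq
        exact ⟨rfl, by omega⟩)
      ⟨s.toList, List.mem_singleton.mpr rfl, by omega⟩
      (by intro q hq; simp at hq)
    rw [show s.toList.length + 1 - 1 = s.toList.length from by omega] at hmain
    exact hmain
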